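-- pv_equiv track=rewrite | github.com/BrunoSilva98/Scramble-Squares | Fator_Ramificacao.py | calc_n
-- ===== SOURCE A (Python) =====
-- def calc_n(b, d):
--     contador = 1
--     n = 0
--     while(contador <= d):
--         n += b**contador
--         contador += 1
--     n += 1
--     return n
-- ===== SOURCE B (Python) =====
-- def calc_n(b, d):
--     # closed-form geometric series: sum_{i=1..d} b^i + 1
--     if d <= 0:
--         return 1
--     if b == 1:
--         return d + 1
--     return (b ** (d + 1) - b) // (b - 1) + 1
-- ===== Notes on version B (the rewrite author's own statement) =====
-- stated objective: faster
-- what changed: replaces the O(d) summation loop over b**1..b**d with the closed-form geometric series (b^(d+1)-b)//(b-1)+1 (b==1 and d<=0 special-cased)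
import Mathlib
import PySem

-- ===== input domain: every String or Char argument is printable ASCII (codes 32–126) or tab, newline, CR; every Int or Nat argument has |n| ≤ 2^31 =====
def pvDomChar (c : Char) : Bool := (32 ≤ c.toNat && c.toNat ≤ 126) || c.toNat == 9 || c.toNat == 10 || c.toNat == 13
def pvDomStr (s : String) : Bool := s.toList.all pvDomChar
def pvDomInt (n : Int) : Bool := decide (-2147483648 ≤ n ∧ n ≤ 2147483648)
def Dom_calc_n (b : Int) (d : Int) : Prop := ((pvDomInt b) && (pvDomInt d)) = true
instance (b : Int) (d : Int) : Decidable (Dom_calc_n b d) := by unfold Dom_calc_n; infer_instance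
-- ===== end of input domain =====

-- B replaces A's O(d) summation loop with the closed-form geometric series (b^(d+1)-b)/(b-1)+1.

-- ===== PORT A =====
-- while loop with state (contador, n); contador is ≥ 1 whenever the body runs, so
-- Python's b**contador is the integer power b ^ contador.toNat (exact on reachable states).
-- the while loop runs exactly max(d,0) times; fuel = d.toNat bounds it, the guard stays explicit
def calc_n_loop (b d : Int) : Nat → Int → Int → Int
  | 0, _, n => n
  | k + 1, contador, n =>
    if contador ≤ d then calc_n_loop b d k (contador + 1) (n + b ^ contador.toNat)
    else n

def calc_n (b : Int) (d : Int) : Int :=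
  calc_n_loop b d d.toNat 1 0 + 1

-- ===== PORT B =====
def calc_n_alt (b : Int) (d : Int) : Int :=
  if d ≤ 0 then 1
  else if b = 1 then d + 1
  else PySem.Int.floordiv (b ^ (d + 1).toNat - b) (b - 1) + 1

-- ===== PRECONDITION & SPEC =====
def Spec_calc_n (b : Int) (d : Int) (out : Int) : Prop := out = calc_n_alt b d
instance (b : Int) (d : Int) (out : Int) : Decidable (Spec_calc_n b d out) := by unfold Spec_calc_n; infer_instance

-- ===== CLAIM (what is proved, stated in full; the proofs are below) =====
def Claim_equal_calc_n : Prop := ∀ (b : Int) (d : Int), Dom_calc_n b d → Spec_calc_n b d (calc_n b d)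

-- ===== LEMMAS AND PROOFS =====

-- loop characterisation: from counter c (with c ≥ 1, c + k = d + 1) the loop adds Σ_{j<k} b^(c+j)
theorem calc_n_loop_eq (b d : Int) (k : Nat) :
    ∀ (c n : Int), 1 ≤ c → c + k = d + 1 →
      calc_n_loop b d k c n = n + ∑ j ∈ Finset.range k, b ^ (c.toNat + j) := by
  induction k with
  | zero =>
    intro c n hc hk
    simp [calc_n_loop]
  | succ k ih =>
    intro c n hc hk
    rw [calc_n_loop]
    rw [if_pos (by omega)]
    rw [ih (c + 1) _ (by omega) (by omega)]
    rw [Finset.sum_range_succ']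
    have hcn : (c + 1).toNat = c.toNat + 1 := by omega
    have hsum : ∀ j ∈ Finset.range k, b ^ ((c + 1).toNat + j) = b ^ (c.toNat + (j + 1)) := by
      intro j _
      congr 1
      omega
    rw [Finset.sum_congr rfl hsum]
    ring

-- telescoping: (b - 1) * Σ_{j<k} b^(1+j) = b^(k+1) - b
theorem geom_mul (b : Int) (k : Nat) :
    (b - 1) * ∑ j ∈ Finset.range k, b ^ (1 + j) = b ^ (k + 1) - b := by
  induction k with
  | zero => simp
  | succ k ih =>
    rw [Finset.sum_range_succ, mul_add, ih]
    ring

-- ===== VERDICT (by name: the statement is the Claim_ definition above) =====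
theorem calc_n_spec : Claim_equal_calc_n := by
  intro b d _
  unfold Spec_calc_n calc_n calc_n_alt
  by_cases hd : d ≤ 0
  · have h0 : d.toNat = 0 := by omega
    rw [if_pos hd, h0, calc_n_loop]; norm_num
  · rw [if_neg hd]
    have hk : (1 : Int) + (d.toNat : Int) = d + 1 := by omega
    rw [calc_n_loop_eq b d d.toNat 1 0 le_rfl hk]
    have h1 : (1 : Int).toNat = 1 := rfl
    by_cases hb : b = 1
    · subst hb
      simp
      omega
    · rw [if_neg hb]
      have hb1 : b - 1 ≠ 0 := by
        intro h; apply hb; omega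
      have hpow : b ^ (d + 1).toNat = b ^ (d.toNat + 1) := by
        congr 1; omega
      rw [hpow, ← geom_mul b d.toNat]
      have hfd : PySem.Int.floordiv ((b - 1) * ∑ j ∈ Finset.range d.toNat, b ^ (1 + j)) (b - 1)
          = ∑ j ∈ Finset.range d.toNat, b ^ (1 + j) := by
        have hmod : PySem.Int.mod ((b - 1) * ∑ j ∈ Finset.range d.toNat, b ^ (1 + j)) (b - 1) = 0 :=
          (PySem.Int.mod_eq_zero_iff_dvd _ _).mpr (dvd_mul_right _ _)
        have hfm := PySem.Int.floordiv_mul_add_mod ((b - 1) * ∑ j ∈ Finset.range d.toNat, b ^ (1 + j)) (b - 1)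
        rw [hmod, add_zero] at hfm
        have := mul_right_cancel₀ hb1 (hfm.trans (mul_comm _ _))
        exact this
      rw [hfd, h1]; ring
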